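-- pv_equiv track=rewrite | github.com/najicham/nba-stats-scraper | orchestration/cloud_functions/line_quality_self_heal/main.py | get_regeneration_summary
-- ===== SOURCE A (Python) =====
-- from typing import Dict, List, Optional, Tuple
--
-- def get_regeneration_summary(
--
--     predictions: List[Dict]
-- ) -> Dict[str, List[str]]:
--     """
--     Group predictions by game_date for regeneration.
--
--     Returns: {game_date: [player_lookup, ...]}
--     """
--     by_date = {}
--     for pred in predictions:
--         game_date = str(pred['game_date'])
--         if game_date not in by_date:
--             by_date[game_date] = []
--         by_date[game_date].append(pred['player_lookup'])
--     return by_date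
-- ===== SOURCE B (Python) =====
-- def get_regeneration_summary(predictions):
--     """
--     Group predictions by game_date for regeneration.
--
--     Returns: {game_date: [player_lookup, ...]}
--
--     Strategy: peel off one whole game_date group per pass (partition by the
--     first remaining date) instead of accumulating dict entries one by one.
--     """
--     by_date = {}
--     rest = predictions
--     while rest:
--         game_date = str(rest[0]['game_date'])
--         by_date[game_date] = [p['player_lookup'] for p in rest
--                               if str(p['game_date']) == game_date]
--         rest = [p for p in rest if str(p['game_date']) != game_date]
--     return by_date
-- ===== Notes on version B (the rewrite author's own statement) =====
-- stated objective: alternative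
-- what changed: B partitions the list date-by-date (each pass extracts the whole group of the first remaining game_date and removes it) instead of A's element-by-element dict accumulation.
import Mathlib
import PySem

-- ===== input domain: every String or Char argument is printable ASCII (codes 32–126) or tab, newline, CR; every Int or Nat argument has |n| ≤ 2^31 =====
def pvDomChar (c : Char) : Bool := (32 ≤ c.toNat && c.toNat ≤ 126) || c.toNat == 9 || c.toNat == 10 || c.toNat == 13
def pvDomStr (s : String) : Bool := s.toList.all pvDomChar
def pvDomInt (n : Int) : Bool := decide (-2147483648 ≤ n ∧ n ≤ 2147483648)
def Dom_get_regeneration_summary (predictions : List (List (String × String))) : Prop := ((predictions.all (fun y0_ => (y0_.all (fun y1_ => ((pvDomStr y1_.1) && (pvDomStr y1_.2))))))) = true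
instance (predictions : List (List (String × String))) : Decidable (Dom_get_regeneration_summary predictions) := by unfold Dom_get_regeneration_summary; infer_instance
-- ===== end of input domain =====

-- B groups by peeling off one whole game_date group per pass (partition on the first
-- remaining date) instead of A's element-by-element dict accumulation; alternative, not faster.

-- pred['game_date'] / pred['player_lookup']: values are str, so Python's str() is the identity;
-- a missing key is a KeyError in Python (excluded by Pre_), so the getD "" default is never reached inside Pre_.
def pvKey (p : List (String × String)) : String := ((PySem.Dict.mk p).get? "game_date").getD ""
def pvPl (p : List (String × String)) : String := ((PySem.Dict.mk p).get? "player_lookup").getD ""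

-- ===== PORT A =====
def get_regeneration_summary (predictions : List (List (String × String))) : List (String × List String) :=
  (predictions.foldl
    (fun by_date pred =>
      let game_date := pvKey pred
      let d := if by_date.contains game_date then by_date else by_date.insert game_date []
      d.insert game_date (d.getD game_date [] ++ [pvPl pred]))
    (PySem.Dict.empty : PySem.Dict String (List String))).items

-- ===== PORT B =====
def altGroups (rest : List (List (String × String))) : List (String × List String) :=
  match rest with
  | [] => []
  | p :: t =>
    let game_date := pvKey p
    (game_date, ((p :: t).filter (fun q => pvKey q == game_date)).map pvPl)
      :: altGroups ((p :: t).filter (fun q => !(pvKey q == game_date)))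
termination_by rest.length
decreasing_by
  simp only [List.filter_cons, beq_self_eq_true, Bool.not_true, List.length_cons]
  exact Nat.lt_succ_of_le (List.length_filter_le _ _)

def get_regeneration_summary_alt (predictions : List (List (String × String))) : List (String × List String) :=
  altGroups predictions

-- ===== PRECONDITION & SPEC =====
-- Pre_ excludes exactly the inputs where the Python A raises KeyError: a prediction missing
-- the 'game_date' or 'player_lookup' key.
def Pre_get_regeneration_summary (predictions : List (List (String × String))) : Prop :=
  ∀ p ∈ predictions, ((PySem.Dict.mk p).get? "game_date").isSome = true ∧ ((PySem.Dict.mk p).get? "player_lookup").isSome = true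
instance (predictions : List (List (String × String))) : Decidable (Pre_get_regeneration_summary predictions) := by unfold Pre_get_regeneration_summary; infer_instance

def pvWitness_get_regeneration_summary : (List (List (String × String))) :=
  [[("game_date", "2024-01-01"), ("player_lookup", "lebronjames")],
   [("game_date", "2024-01-02"), ("player_lookup", "stephcurry")],
   [("game_date", "2024-01-01"), ("player_lookup", "lukadoncic")]]

def Spec_get_regeneration_summary (predictions : List (List (String × String))) (out : List (String × List String)) : Prop := out = get_regeneration_summary_alt predictions
instance (predictions : List (List (String × String))) (out : List (String × List String)) : Decidable (Spec_get_regeneration_summary predictions out) := by unfold Spec_get_regeneration_summary; infer_instance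

-- ===== CLAIM (what is proved, stated in full; the proofs are below) =====
def Claim_equal_get_regeneration_summary : Prop := ∀ (predictions : List (List (String × String))), Dom_get_regeneration_summary predictions → Pre_get_regeneration_summary predictions → Spec_get_regeneration_summary predictions (get_regeneration_summary predictions)

-- ===== LEMMAS AND PROOFS =====

-- canonical form both ports are reduced to: first-occurrence-ordered distinct dates,
-- each paired with the player_lookups of its matching predictions in order
def canonGroups (l : List (List (String × String))) : List (String × List String) :=
  (PySem.Set.ofList (l.map pvKey)).map
    (fun k => (k, (l.filter (fun q => pvKey q == k)).map pvPl))

lemma stepA_eq_modify (d : PySem.Dict String (List String)) (p : List (String × String)) :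
    (let game_date := pvKey p
     let d' := if d.contains game_date then d else d.insert game_date []
     d'.insert game_date (d'.getD game_date [] ++ [pvPl p]))
      = d.modify (pvKey p) [] (· ++ [pvPl p]) := by
  by_cases h : d.contains (pvKey p)
  · simp [h, PySem.Dict.modify]
  · simp only [Bool.not_eq_true] at h
    simp [h, PySem.Dict.modify, PySem.Dict.getD_insert_self, PySem.Dict.insert_insert_self,
      PySem.Dict.getD_of_not_contains _ _ h]

lemma ofList_filter {α : Type} [BEq α] [LawfulBEq α] (p : α → Bool) (xs : List α) :
    (PySem.Set.ofList xs).filter p = PySem.Set.ofList (xs.filter p) := by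
  induction xs with
  | nil => rfl
  | cons y ys ih =>
    rw [PySem.Set.ofList_cons, PySem.Set.discard]
    by_cases hy : p y = true
    · rw [List.filter_cons_of_pos hy, List.filter_comm, ih, List.filter_cons_of_pos hy,
        PySem.Set.ofList_cons, PySem.Set.discard]
    · rw [List.filter_cons_of_neg (by simp [hy]), List.filter_comm, ih,
        List.filter_cons_of_neg (by simp [hy])]
      apply List.filter_eq_self.mpr
      intro a ha
      have hpa := List.of_mem_filter ((PySem.Set.mem_ofList _ _).mp ha)
      have hne : a ≠ y := by rintro rfl; rw [hpa] at hy; exact hy rfl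
      simp [hne]

lemma A_eq_canon (l : List (List (String × String))) :
    get_regeneration_summary l = canonGroups l := by
  unfold get_regeneration_summary
  have hstep : (fun (by_date : PySem.Dict String (List String)) pred =>
      let game_date := pvKey pred
      let d := if by_date.contains game_date then by_date else by_date.insert game_date []
      d.insert game_date (d.getD game_date [] ++ [pvPl pred]))
      = fun d p => d.modify (pvKey p) [] (· ++ [pvPl p]) := by
    funext d p; exact stepA_eq_modify d p
  rw [hstep]
  set D := l.foldl (fun d p => d.modify (pvKey p) [] (· ++ [pvPl p])) PySem.Dict.empty with hD
  have hkeys : D.keys = PySem.Set.ofList (l.map pvKey) := by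
    rw [hD, PySem.Dict.keys_foldl_modify_key l pvKey [] (fun _ p => (· ++ [pvPl p]))]
    simp [PySem.Set.update_nil_left]
  have hnodup : D.keys.Nodup := by
    rw [hD]
    exact PySem.Dict.nodup_keys_foldl_modify_key l pvKey [] (fun _ p => (· ++ [pvPl p])) _ (by simp)
  have hget : ∀ k, D.getD k [] = (l.filter (fun q => pvKey q == k)).map pvPl := by
    intro k
    have hmap : l.foldl (fun d p => d.modify (pvKey p) [] (· ++ [pvPl p])) PySem.Dict.empty
        = (l.map (fun p => (pvKey p, pvPl p))).foldl
            (fun d q => d.modify q.1 [] (· ++ [q.2])) PySem.Dict.empty := by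
      rw [List.foldl_map]
    rw [hD, hmap, PySem.Dict.getD_foldl_modify_append]
    simp [List.filter_map, Function.comp_def, List.map_map]
  rw [PySem.Dict.items_eq_map_keys D hnodup [], hkeys, canonGroups]
  apply List.map_congr_left
  intro k _
  rw [hget k]

lemma B_eq_canon (l : List (List (String × String))) : altGroups l = canonGroups l := by
  induction l using altGroups.induct with
  | case1 => rw [altGroups]; simp [canonGroups, PySem.Set.ofList_nil]
  | case2 p t gd ih =>
    rw [altGroups]
    rw [ih]
    have hhead : (p :: t).filter (fun q => !(pvKey q == pvKey p)) = t.filter (fun q => !(pvKey q == pvKey p)) := by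
      simp
    unfold canonGroups
    rw [List.map_cons, PySem.Set.ofList_cons, List.map_cons]
    congr 1
    have hmapfilter : (t.filter (fun q => !(pvKey q == pvKey p))).map pvKey
        = (t.map pvKey).filter (fun y => !(y == pvKey p)) := by
      simp [List.filter_map, Function.comp_def]
    rw [hhead, hmapfilter, ← ofList_filter, PySem.Set.discard]
    apply List.map_congr_left
    intro k hk
    have hkne : k ≠ pvKey p := by
      have := (List.mem_filter.mp hk).2
      simpa using this
    congr 1
    rw [List.filter_filter, List.filter_cons_of_neg (by simp; intro h; exact hkne h.symm)]
    congr 1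
    apply List.filter_congr
    intro q _
    by_cases hq : pvKey q = k
    · simp [hq, hkne]
    · simp [hq]

-- ===== VERDICT (by name: the statement is the Claim_ definition above) =====
theorem get_regeneration_summary_spec : Claim_equal_get_regeneration_summary := by
  intro predictions _ _
  unfold Spec_get_regeneration_summary get_regeneration_summary_alt
  rw [A_eq_canon, B_eq_canon]
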